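-- pv_equiv track=rewrite | github.com/iamkissg/nowcoder | campus/58/大鱼吃小鱼.py | eat
-- ===== SOURCE A (Python) =====
-- def eat(F, m):
--     F.sort()
--
--     for _ in range(m):
--         min_val = F[0]
--         tmp = []
--         for i, v in enumerate(F[1:], start=1):
--             if v != min_val:
--                 tmp.append(v+min_val)
--                 tmp.extend(F[i+1:])
--                 break
--             else:
--                 tmp.append(v)
--         F = tmp
--         F.sort()
--
--     return F[0]
-- ===== SOURCE B (Python) =====
-- def _take_one(runs):
--     # remove one element from the first run; return (its value, remaining runs)
--     v, c = runs[0]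
--     return v, (runs[1:] if c == 1 else [(v, c - 1)] + runs[1:])
--
--
-- def _add_one(y, runs):
--     # insert one copy of y into the sorted run list
--     out = []
--     i = 0
--     while i < len(runs) and runs[i][0] < y:
--         out.append(runs[i])
--         i += 1
--     if i < len(runs) and runs[i][0] == y:
--         out.append((y, runs[i][1] + 1))
--         i += 1
--     else:
--         out.append((y, 1))
--     out.extend(runs[i:])
--     return out
--
--
-- def eat(F, m):
--     # Ordered multiset kept as run-length pairs (value, count): duplicates
--     # collapse into counts, so a round touches at most three runs and nothing
--     # is ever re-sorted.  (Unlike A, F itself is not mutated.)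
--     S = sorted(F)
--     runs = []
--     i = 0
--     while i < len(S):
--         j = i + 1
--         while j < len(S) and S[j] == S[i]:
--             j += 1
--         runs.append((S[i], j - i))
--         i = j
--     for _ in range(m):
--         x, rest = _take_one(runs)
--         if rest and rest[0][0] == x:
--             head, bigger = rest[:1], rest[1:]
--         else:
--             head, bigger = [], rest
--         if bigger:
--             w, tail = _take_one(bigger)
--             runs = _add_one(x + w, head + tail)
--         else:
--             runs = head
--     return runs[0][0]
-- ===== Notes on version B (the rewrite author's own statement) =====
-- stated objective: faster
-- what changed: B represents the multiset as a sorted run-length encoding (value, count) and each round moves single copies between at most three runs, instead of A's per-element rebuild of the list followed by a full re-sort every round.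
import Mathlib
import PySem

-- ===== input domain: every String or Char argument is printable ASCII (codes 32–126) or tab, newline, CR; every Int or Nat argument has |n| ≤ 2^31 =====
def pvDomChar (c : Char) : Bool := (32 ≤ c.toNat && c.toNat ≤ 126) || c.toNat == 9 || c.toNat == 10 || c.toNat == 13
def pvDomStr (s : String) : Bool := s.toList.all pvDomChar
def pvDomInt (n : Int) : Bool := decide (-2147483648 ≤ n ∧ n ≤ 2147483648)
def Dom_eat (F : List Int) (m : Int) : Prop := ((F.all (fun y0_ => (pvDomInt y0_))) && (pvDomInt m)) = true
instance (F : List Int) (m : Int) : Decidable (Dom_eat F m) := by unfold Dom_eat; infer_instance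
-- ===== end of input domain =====

-- B keeps the multiset as a sorted run-length encoding (value, count) and moves single
-- copies between runs, instead of A's per-element rebuild plus a full re-sort each round
-- (objective: faster — one sort up front, no re-sort per round).  Note: Python A sorts its argument list in place
-- (caller-visible mutation); B does not — the claim is about the return value only.

-- ===== PORT A =====
-- A's inner for-loop over enumerate(F[1:], start=1): append v while v == min_val,
-- then once append v+min_val, extend with the remaining tail, and break.
def eatInner (minVal : Int) : List Int → List Int
  | [] => []
  | v :: rest => if v ≠ minVal then (v + minVal) :: rest else v :: eatInner minVal rest

-- A's outer 'for _ in range(m)' loop; [] case = where Python raises IndexError on F[0]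
-- (excluded by Pre_eat).
def eatLoopA : Nat → List Int → List Int
  | 0, F => F
  | k + 1, F =>
    match F with
    | [] => []
    | x :: xs => eatLoopA k (PySem.List.sorted (eatInner x xs) (fun y => y) false)

def eat (F : List Int) (m : Int) : Int :=
  -- final 'return F[0]'; .getD 0 only on the empty list, where Python raises (outside Pre_eat)
  ((eatLoopA m.toNat (PySem.List.sorted F (fun y => y) false)).head?).getD 0

-- ===== PORT B =====
-- B's run-building scan: the inner 'while S[j] == S[i]' index scan is exactly the
-- takeWhile/dropWhile split of the sorted list.
def rleOf : List Int → List (Int × Int)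
  | [] => []
  | v :: t =>
    (v, 1 + ((t.takeWhile (fun u => u == v)).length : Int)) ::
      rleOf (t.dropWhile (fun u => u == v))
  termination_by l => l.length
  decreasing_by
    exact Nat.lt_succ_of_le (List.length_dropWhile_le _ _)

-- B's _take_one; the [] case is where Python raises IndexError (outside Pre_eat).
def takeOne : List (Int × Int) → Int × List (Int × Int)
  | [] => (0, [])
  | (v, c) :: t => (v, if c = 1 then t else (v, c - 1) :: t)

-- B's _add_one: scan while value < y, then merge into an equal run or start a new one.
def addOne (y : Int) : List (Int × Int) → List (Int × Int)
  | [] => [(y, 1)]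
  | (v, c) :: t =>
    if v < y then (v, c) :: addOne y t
    else if v = y then (y, c + 1) :: t
    else (y, 1) :: (v, c) :: t

-- one round of B's main loop
def stepR (runs : List (Int × Int)) : List (Int × Int) :=
  let p := takeOne runs
  let hb : List (Int × Int) × List (Int × Int) :=
    match p.2 with
    | [] => ([], [])
    | (u, d) :: t => if u = p.1 then ([(u, d)], t) else ([], (u, d) :: t)
  match hb.2 with
  | [] => hb.1
  | bigger =>
    let q := takeOne bigger
    addOne (p.1 + q.1) (hb.1 ++ q.2)

def eatLoopR : Nat → List (Int × Int) → List (Int × Int)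
  | 0, R => R
  | k + 1, R => eatLoopR k (stepR R)

def eat_alt (F : List Int) (m : Int) : Int :=
  -- final 'return runs[0][0]'; .getD 0 only on the empty list (outside Pre_eat)
  (((eatLoopR m.toNat (rleOf (PySem.List.sorted F (fun y => y) false))).head?).map Prod.fst).getD 0

-- ===== PRECONDITION & SPEC =====
-- Pre_eat holds exactly where Python A returns normally: A raises IndexError on F[0]
-- iff F is empty or m ≥ len(F) (each round shortens the multiset by one).
def Pre_eat (F : List Int) (m : Int) : Prop := F ≠ [] ∧ m < (F.length : Int)
instance (F : List Int) (m : Int) : Decidable (Pre_eat F m) := by unfold Pre_eat; infer_instance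

def pvWitness_eat : List Int × Int := ([3, 1, 2, 1], 2)

def Spec_eat (F : List Int) (m : Int) (out : Int) : Prop := out = eat_alt F m
instance (F : List Int) (m : Int) (out : Int) : Decidable (Spec_eat F m out) := by unfold Spec_eat; infer_instance

-- ===== CLAIM (what is proved, stated in full; the proofs are below) =====
def Claim_equal_eat : Prop := ∀ (F : List Int) (m : Int), Dom_eat F m → Pre_eat F m → Spec_eat F m (eat F m)

-- ===== LEMMAS AND PROOFS =====

-- ---------- abstract one-round step on a plain sorted list (proof-only) ----------
def insertOrd (y : Int) : List Int → List Int
  | [] => [y]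
  | a :: l => if a < y then a :: insertOrd y l else y :: a :: l

def stepS : List Int → List Int
  | [] => []
  | x :: xs =>
    match xs.dropWhile (fun v => v == x) with
    | [] => xs
    | w :: t => insertOrd (x + w) (xs.takeWhile (fun v => v == x) ++ t)

def loopS : Nat → List Int → List Int
  | 0, G => G
  | k + 1, G => loopS k (stepS G)

-- ---------- A's loop equals the abstract loop on sorted lists ----------
theorem eatInner_eq (x : Int) (xs : List Int) :
    eatInner x xs =
      xs.takeWhile (fun v => v == x) ++
        (match xs.dropWhile (fun v => v == x) with
         | [] => []
         | w :: t => (w + x) :: t) := by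
  induction xs with
  | nil => rfl
  | cons v rest ih =>
    by_cases h : v = x
    · subst h
      simp [eatInner, List.takeWhile, List.dropWhile, ih]
    · have hb : (v == x) = false := by simpa using h
      simp [eatInner, h, hb, List.takeWhile, List.dropWhile]

theorem insertOrd_eq_orderedInsert (y : Int) (l : List Int) :
    insertOrd y l = List.orderedInsert (· ≤ ·) y l := by
  induction l with
  | nil => rfl
  | cons a l ih =>
    by_cases h : a < y
    · simp [insertOrd, List.orderedInsert, h, ih, not_le.mpr h]
    · simp [insertOrd, List.orderedInsert, h, not_lt.mp h]

theorem insertOrd_perm (y : Int) (l : List Int) : (insertOrd y l).Perm (y :: l) := by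
  rw [insertOrd_eq_orderedInsert]; exact List.perm_orderedInsert _ y l

theorem insertOrd_sorted (y : Int) (l : List Int) (h : l.Pairwise (· ≤ ·)) :
    (insertOrd y l).Pairwise (· ≤ ·) := by
  rw [insertOrd_eq_orderedInsert]
  exact List.Pairwise.orderedInsert y l h

theorem drop_mid_sorted (p : List Int) (w : Int) (t : List Int)
    (h : (p ++ w :: t).Pairwise (· ≤ ·)) : (p ++ t).Pairwise (· ≤ ·) :=
  h.sublist ((List.sublist_cons_self w t).append_left p)

theorem takeWhile_dropWhile_split (x : Int) (xs : List Int) (w : Int) (t : List Int)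
    (hd : xs.dropWhile (fun v => v == x) = w :: t) :
    xs.takeWhile (fun v => v == x) ++ w :: t = xs := by
  rw [← hd, List.takeWhile_append_dropWhile]

theorem step_eq (x : Int) (xs : List Int) (h : (x :: xs).Pairwise (· ≤ ·)) :
    PySem.List.sorted (eatInner x xs) (fun y => y) false = stepS (x :: xs) := by
  have hxs : xs.Pairwise (· ≤ ·) := h.tail
  rw [eatInner_eq]
  cases hd : xs.dropWhile (fun v => v == x) with
  | nil =>
    have ht : xs.takeWhile (fun v => v == x) = xs := by
      have := List.takeWhile_append_dropWhile (p := fun v => v == x) (l := xs)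
      rw [hd] at this; simpa using this
    simp only [stepS, hd, ht, List.append_nil]
    exact PySem.List.sorted_eq_self_of_pairwise xs _ hxs
  | cons w t =>
    have hps : (xs.takeWhile (fun v => v == x) ++ w :: t).Pairwise (· ≤ ·) := by
      rw [takeWhile_dropWhile_split x xs w t hd]; exact hxs
    simp only [stepS, hd]
    apply PySem.List.sorted_id_eq_of_perm_of_pairwise
    · refine (insertOrd_perm _ _).trans ?_
      rw [Int.add_comm x w]
      exact List.perm_middle.symm
    · exact insertOrd_sorted _ _ (drop_mid_sorted _ w t hps)

theorem stepS_sorted (G : List Int) (h : G.Pairwise (· ≤ ·)) :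
    (stepS G).Pairwise (· ≤ ·) := by
  cases G with
  | nil => exact List.Pairwise.nil
  | cons x xs =>
    cases hd : xs.dropWhile (fun v => v == x) with
    | nil => simpa [stepS, hd] using h.tail
    | cons w t =>
      have hps : (xs.takeWhile (fun v => v == x) ++ w :: t).Pairwise (· ≤ ·) := by
        rw [takeWhile_dropWhile_split x xs w t hd]; exact h.tail
      simp only [stepS, hd]
      exact insertOrd_sorted _ _ (drop_mid_sorted _ w t hps)

theorem loopS_nil (k : Nat) : loopS k [] = [] := by
  induction k with
  | zero => rfl
  | succ k ih => simpa [loopS, stepS] using ih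

theorem loopsA_eq (k : Nat) : ∀ G : List Int, G.Pairwise (· ≤ ·) → eatLoopA k G = loopS k G := by
  induction k with
  | zero => intro G _; rfl
  | succ k ih =>
    intro G hG
    cases G with
    | nil => simp [eatLoopA, loopS, stepS, loopS_nil]
    | cons x xs =>
      show eatLoopA k (PySem.List.sorted (eatInner x xs) (fun y => y) false) = loopS k (stepS (x :: xs))
      rw [step_eq x xs hG]
      exact ih _ (stepS_sorted _ hG)

-- ---------- run-length encodings and their expansion ----------
def expand (R : List (Int × Int)) : List Int :=
  R.flatMap (fun p => List.replicate p.2.toNat p.1)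

def RInv (R : List (Int × Int)) : Prop :=
  R.Pairwise (fun a b => a.1 < b.1) ∧ ∀ p ∈ R, 1 ≤ p.2

theorem expand_append (A B : List (Int × Int)) : expand (A ++ B) = expand A ++ expand B := by
  simp [expand]

theorem mem_fst_rleOf (L : List Int) (p : Int × Int) (hp : p ∈ rleOf L) : p.1 ∈ L := by
  induction L using rleOf.induct with
  | case1 => simp [rleOf] at hp
  | case2 v t ih =>
    rw [rleOf] at hp
    rcases List.mem_cons.mp hp with h | h
    · subst h; exact List.mem_cons_self
    · exact List.mem_cons_of_mem _ (List.dropWhile_sublist _ |>.mem (ih h))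

theorem lt_of_mem_dropWhile (v : Int) (t : List Int) (hs : t.Pairwise (· ≤ ·))
    (hle : ∀ e ∈ t, v ≤ e) : ∀ e ∈ t.dropWhile (fun u => u == v), v < e := by
  induction t with
  | nil => intro e he; simp [List.dropWhile] at he
  | cons a t' ih =>
    intro e he
    by_cases ha : a = v
    · subst ha
      rw [List.dropWhile_cons_of_pos (by simp)] at he
      exact ih hs.tail (fun e he' => hle e (List.mem_cons_of_mem _ he')) e he
    · rw [List.dropWhile_cons_of_neg (by simpa using ha)] at he
      rcases List.mem_cons.mp he with h | h
      · subst h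
        exact lt_of_le_of_ne (hle _ List.mem_cons_self) (Ne.symm ha)
      · calc v < a := lt_of_le_of_ne (hle _ List.mem_cons_self) (Ne.symm ha)
             _ ≤ e := List.rel_of_pairwise_cons hs h

theorem rleOf_spec (L : List Int) (hs : L.Pairwise (· ≤ ·)) :
    expand (rleOf L) = L ∧ RInv (rleOf L) := by
  induction L using rleOf.induct with
  | case1 =>
    refine ⟨by simp [rleOf, expand], ?_, ?_⟩ <;> simp [rleOf]
  | case2 v t ih =>
    have htp : (t.dropWhile (fun u => u == v)).Pairwise (· ≤ ·) :=
      hs.tail.sublist (List.dropWhile_sublist _)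
    obtain ⟨ihe, ihp, ihc⟩ := ih htp
    have hlt : ∀ e ∈ t.dropWhile (fun u => u == v), v < e :=
      lt_of_mem_dropWhile v t hs.tail (fun e he => List.rel_of_pairwise_cons hs he)
    have htk : t.takeWhile (fun u => u == v) = List.replicate (t.takeWhile (fun u => u == v)).length v := by
      apply List.eq_replicate_of_mem
      intro b hb
      simpa using List.mem_takeWhile_imp hb
    refine ⟨?_, ?_, ?_⟩
    · rw [rleOf]
      show List.replicate (1 + ((t.takeWhile (fun u => u == v)).length : Int)).toNat v ++
          expand (rleOf (t.dropWhile (fun u => u == v))) = v :: t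
      rw [ihe]
      have hn : (1 + ((t.takeWhile (fun u => u == v)).length : Int)).toNat
          = 1 + (t.takeWhile (fun u => u == v)).length := by omega
      rw [hn, List.replicate_add, List.replicate_one, ← htk]
      simp [List.takeWhile_append_dropWhile]
    · rw [rleOf]
      refine List.pairwise_cons.2 ⟨?_, ihp⟩
      intro p hp
      exact hlt p.1 (mem_fst_rleOf _ p hp)
    · rw [rleOf]
      intro p hp
      rcases List.mem_cons.mp hp with h | h
      · subst h; simp
      · exact ihc p h

-- ---------- addOne against insertOrd ----------
theorem insertOrd_replicate_lt (y v : Int) (hv : v < y) (n : Nat) (l : List Int) :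
    insertOrd y (List.replicate n v ++ l) = List.replicate n v ++ insertOrd y l := by
  induction n with
  | zero => simp
  | succ n ih => simp [List.replicate_succ, insertOrd, hv, ih]

theorem addOne_expand (y : Int) (R : List (Int × Int)) (h : RInv R) :
    expand (addOne y R) = insertOrd y (expand R) := by
  obtain ⟨hp, hc⟩ := h
  induction R with
  | nil => simp [addOne, expand, insertOrd]
  | cons a t ih =>
    obtain ⟨v, c⟩ := a
    have hc1 : 1 ≤ c := hc _ List.mem_cons_self
    obtain ⟨k, hk⟩ : ∃ k, c.toNat = k + 1 := ⟨c.toNat - 1, by omega⟩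
    by_cases h1 : v < y
    · rw [addOne]
      simp only [if_pos h1]
      show List.replicate c.toNat v ++ expand (addOne y t)
          = insertOrd y (List.replicate c.toNat v ++ expand t)
      rw [ih hp.tail (fun p hp' => hc p (List.mem_cons_of_mem _ hp')),
        insertOrd_replicate_lt y v h1]
    · by_cases h2 : v = y
      · subst h2
        rw [addOne]
        simp only [if_neg h1, if_pos]
        show List.replicate (c + 1).toNat v ++ expand t
            = insertOrd v (List.replicate c.toNat v ++ expand t)
        rw [hk, show (c + 1).toNat = k + 2 from by omega]
        simp [List.replicate_succ, insertOrd]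
      · rw [addOne]
        simp only [if_neg h1, if_neg h2]
        show List.replicate (1 : Int).toNat y ++ (List.replicate c.toNat v ++ expand t)
            = insertOrd y (List.replicate c.toNat v ++ expand t)
        rw [hk]
        simp [List.replicate_succ, insertOrd, h1]

theorem mem_fst_addOne (y : Int) (R : List (Int × Int)) (p : Int × Int)
    (hp : p ∈ addOne y R) : p.1 = y ∨ p ∈ R := by
  induction R with
  | nil => simp [addOne] at hp; simp [hp]
  | cons a t ih =>
    obtain ⟨v, c⟩ := a
    rw [addOne] at hp
    by_cases h1 : v < y
    · simp only [if_pos h1] at hp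
      rcases List.mem_cons.mp hp with h | h
      · exact Or.inr (h ▸ List.mem_cons_self)
      · rcases ih h with h' | h'
        · exact Or.inl h'
        · exact Or.inr (List.mem_cons_of_mem _ h')
    · by_cases h2 : v = y
      · simp only [if_neg h1, if_pos h2] at hp
        rcases List.mem_cons.mp hp with h | h
        · exact Or.inl (by simp [h])
        · exact Or.inr (List.mem_cons_of_mem _ h)
      · simp only [if_neg h1, if_neg h2] at hp
        rcases List.mem_cons.mp hp with h | h
        · exact Or.inl (by simp [h])
        · exact Or.inr h

theorem addOne_inv (y : Int) (R : List (Int × Int)) (h : RInv R) : RInv (addOne y R) := by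
  obtain ⟨hp, hc⟩ := h
  induction R with
  | nil => exact ⟨by simp [addOne], by simp [addOne]⟩
  | cons a t ih =>
    obtain ⟨v, c⟩ := a
    have hvt : ∀ p ∈ t, v < p.1 := fun p hp' => List.rel_of_pairwise_cons hp hp'
    by_cases h1 : v < y
    · obtain ⟨ihp, ihc⟩ := ih hp.tail (fun p hp' => hc p (List.mem_cons_of_mem _ hp'))
      rw [addOne]; simp only [if_pos h1]
      constructor
      · refine List.pairwise_cons.2 ⟨?_, ihp⟩
        intro p hp'
        rcases mem_fst_addOne y t p hp' with h' | h'
        · rw [h']; exact h1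
        · exact hvt p h'
      · intro p hp'
        rcases List.mem_cons.mp hp' with h' | h'
        · subst h'; exact hc _ List.mem_cons_self
        · exact ihc p h'
    · by_cases h2 : v = y
      · subst h2
        rw [addOne]; simp only [if_neg h1]
        refine ⟨List.pairwise_cons.2 ⟨fun p hp' => hvt p hp', hp.tail⟩, ?_⟩
        intro p hp'
        rcases List.mem_cons.mp hp' with h' | h'
        · subst h'
          have := hc _ (List.mem_cons_self (a := (v, c)))
          simp at this ⊢; omega
        · exact hc p (List.mem_cons_of_mem _ h')
      · rw [addOne]; simp only [if_neg h1, if_neg h2]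
        have hyv : y < v := lt_of_le_of_ne (not_lt.mp h1) (fun h => h2 h.symm)
        constructor
        · refine List.pairwise_cons.2 ⟨?_, hp⟩
          intro p hp'
          rcases List.mem_cons.mp hp' with h' | h'
          · subst h'; exact hyv
          · exact lt_trans hyv (hvt p h')
        · intro p hp'
          rcases List.mem_cons.mp hp' with h' | h'
          · subst h'; simp
          · exact hc p h'

-- ---------- one round of B against the abstract step ----------
theorem takeWhile_replicate_append (x : Int) (n : Nat) (l : List Int)
    (hl : ∀ e ∈ l, (e == x) = false) :
    (List.replicate n x ++ l).takeWhile (fun v => v == x) = List.replicate n x := by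
  induction n with
  | zero =>
    cases l with
    | nil => rfl
    | cons a l' => simp [hl a List.mem_cons_self]
  | succ n ih => simp [List.replicate_succ, ih]

theorem dropWhile_replicate_append (x : Int) (n : Nat) (l : List Int)
    (hl : ∀ e ∈ l, (e == x) = false) :
    (List.replicate n x ++ l).dropWhile (fun v => v == x) = l := by
  induction n with
  | zero =>
    cases l with
    | nil => rfl
    | cons a l' => simp [hl a List.mem_cons_self]
  | succ n ih => simp [List.replicate_succ, ih]

theorem expand_ne_mem (x : Int) (R : List (Int × Int)) (hgt : ∀ p ∈ R, x < p.1) :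
    ∀ e ∈ expand R, (e == x) = false := by
  intro e he
  simp only [expand, List.mem_flatMap] at he
  obtain ⟨p, hpR, hpe⟩ := he
  have he' : e = p.1 := List.eq_of_mem_replicate hpe
  subst he'
  simpa using (hgt p hpR).ne'

theorem takeOne_expand (v c : Int) (t : List (Int × Int)) (hc : 1 ≤ c) :
    expand (takeOne ((v, c) :: t)).2 = List.replicate (c.toNat - 1) v ++ expand t := by
  by_cases h : c = 1
  · subst h; simp [takeOne, expand]
  · simp only [takeOne, if_neg h]
    show List.replicate (c - 1).toNat v ++ expand t = _
    rw [show (c - 1).toNat = c.toNat - 1 from by omega]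

theorem takeOne_inv (v c : Int) (t : List (Int × Int)) (h : RInv ((v, c) :: t)) :
    RInv ((takeOne ((v, c) :: t)).2) ∧ ∀ p ∈ (takeOne ((v, c) :: t)).2, v ≤ p.1 := by
  obtain ⟨hp, hc⟩ := h
  have hvt : ∀ p ∈ t, v < p.1 := fun p hp' => List.rel_of_pairwise_cons hp hp'
  by_cases h1 : c = 1
  · subst h1
    simp only [takeOne, if_pos]
    exact ⟨⟨hp.tail, fun p hp' => hc p (List.mem_cons_of_mem _ hp')⟩,
      fun p hp' => le_of_lt (hvt p hp')⟩
  · have hc2 : 2 ≤ c := by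
      have := hc _ (List.mem_cons_self (a := (v, c))); simp at this; omega
    simp only [takeOne, if_neg h1]
    refine ⟨⟨List.pairwise_cons.2 ⟨hvt, hp.tail⟩, ?_⟩, ?_⟩
    · intro p hp'
      rcases List.mem_cons.mp hp' with h' | h'
      · subst h'; simp; omega
      · exact hc p (List.mem_cons_of_mem _ h')
    · intro p hp'
      rcases List.mem_cons.mp hp' with h' | h'
      · subst h'; simp
      · exact le_of_lt (hvt p h')

-- the merge case shared by both count branches of stepR
theorem merge_eq (x : Int) (H : List (Int × Int)) (n : Nat) (w d : Int) (t : List (Int × Int))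
    (hHe : expand H = List.replicate n x)
    (hHi : RInv H) (hHx : ∀ p ∈ H, p.1 = x)
    (hinv : RInv ((w, d) :: t)) (hxw : x < w) :
    expand (addOne (x + w) (H ++ (takeOne ((w, d) :: t)).2))
        = insertOrd (x + w) (List.replicate n x ++ (List.replicate (d.toNat - 1) w ++ expand t))
      ∧ RInv (addOne (x + w) (H ++ (takeOne ((w, d) :: t)).2)) := by
  have hd1 : 1 ≤ d := hinv.2 _ List.mem_cons_self
  have htake := takeOne_expand w d t hd1
  obtain ⟨hti, htw⟩ := takeOne_inv w d t hinv
  have hArinv : RInv (H ++ (takeOne ((w, d) :: t)).2) := by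
    constructor
    · apply List.pairwise_append.2
      exact ⟨hHi.1, hti.1, fun a ha b hb => (hHx a ha) ▸ lt_of_lt_of_le hxw (htw b hb)⟩
    · intro p hp
      rcases List.mem_append.mp hp with h' | h'
      · exact hHi.2 p h'
      · exact hti.2 p h'
  refine ⟨?_, addOne_inv _ _ hArinv⟩
  rw [addOne_expand _ _ hArinv, expand_append, hHe, htake]

theorem step_expand (R : List (Int × Int)) (h : RInv R) :
    expand (stepR R) = stepS (expand R) ∧ RInv (stepR R) := by
  match R with
  | [] => exact ⟨rfl, List.Pairwise.nil, by simp [stepR, takeOne]⟩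
  | (x, c) :: rs =>
    obtain ⟨hp, hc⟩ := h
    have hc1 : 1 ≤ c := hc _ List.mem_cons_self
    have hxlt : ∀ p ∈ rs, x < p.1 := fun p hp' => List.rel_of_pairwise_cons hp hp'
    have hrsinv : RInv rs := ⟨hp.tail, fun p hp' => hc p (List.mem_cons_of_mem _ hp')⟩
    have hne : ∀ e ∈ expand rs, (e == x) = false := expand_ne_mem x rs hxlt
    have hrep : expand ((x, c) :: rs) = x :: (List.replicate (c.toNat - 1) x ++ expand rs) := by
      show List.replicate c.toNat x ++ expand rs = _
      obtain ⟨k, hk⟩ : ∃ k, c.toNat = k + 1 := ⟨c.toNat - 1, by omega⟩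
      rw [hk]; simp [List.replicate_succ]
    rw [hrep]
    have hdrop : (List.replicate (c.toNat - 1) x ++ expand rs).dropWhile (fun v => v == x)
        = expand rs := dropWhile_replicate_append x _ _ hne
    have htakew : (List.replicate (c.toNat - 1) x ++ expand rs).takeWhile (fun v => v == x)
        = List.replicate (c.toNat - 1) x := takeWhile_replicate_append x _ _ hne
    rcases rs with _ | ⟨⟨w, d⟩, t⟩
    · -- no strictly larger element: the round just removes one copy of the minimum
      have hnil : expand ([] : List (Int × Int)) = [] := rfl
      rw [hnil] at hdrop ⊢
      have hS : stepS (x :: (List.replicate (c.toNat - 1) x ++ []))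
          = List.replicate (c.toNat - 1) x := by
        rw [stepS, hdrop]
        simp
      rw [hS]
      by_cases h1 : c = 1
      · subst h1
        exact ⟨rfl, List.Pairwise.nil, by simp [stepR, takeOne]⟩
      · have hred : stepR ((x, c) :: []) = [(x, c - 1)] := by
          simp [stepR, takeOne, if_neg h1]
        rw [hred]
        refine ⟨?_, List.pairwise_singleton _ _, ?_⟩
        · show List.replicate (c - 1).toNat x ++ [] = _
          rw [show (c - 1).toNat = c.toNat - 1 from by omega]; simp
        · intro p hp'
          rcases List.mem_cons.mp hp' with h' | h'
          · subst h'; simp; omega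
          · simp at h'
    · have hxw : x < w := hxlt _ List.mem_cons_self
      have hd1 : 1 ≤ d := hrsinv.2 _ List.mem_cons_self
      have hrep2 : expand ((w, d) :: t) = w :: (List.replicate (d.toNat - 1) w ++ expand t) := by
        show List.replicate d.toNat w ++ expand t = _
        obtain ⟨k, hk⟩ : ∃ k, d.toNat = k + 1 := ⟨d.toNat - 1, by omega⟩
        rw [hk]; simp [List.replicate_succ]
      have hS : stepS (x :: (List.replicate (c.toNat - 1) x ++ expand ((w, d) :: t)))
          = insertOrd (x + w)
              (List.replicate (c.toNat - 1) x ++ (List.replicate (d.toNat - 1) w ++ expand t)) := by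
        rw [stepS, hdrop, htakew, hrep2]
      rw [hS]
      by_cases h1 : c = 1
      · have hred : stepR ((x, c) :: (w, d) :: t)
            = addOne (x + w) ([] ++ (takeOne ((w, d) :: t)).2) := by
          have hwx : ¬ w = x := fun he => absurd he.symm (ne_of_lt hxw)
          subst h1
          simp [stepR, takeOne, if_neg hwx]
        rw [hred, show c.toNat - 1 = 0 from by omega]
        exact merge_eq x [] 0 w d t rfl ⟨List.Pairwise.nil, by simp⟩ (by simp) hrsinv hxw
      · have hred : stepR ((x, c) :: (w, d) :: t)
            = addOne (x + w) ([(x, c - 1)] ++ (takeOne ((w, d) :: t)).2) := by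
          simp [stepR, takeOne, if_neg h1]
        rw [hred]
        refine merge_eq x [(x, c - 1)] (c.toNat - 1) w d t ?_ ?_ ?_ hrsinv hxw
        · show List.replicate (c - 1).toNat x ++ [] = _
          rw [show (c - 1).toNat = c.toNat - 1 from by omega]; simp
        · refine ⟨List.pairwise_singleton _ _, ?_⟩
          intro p hp'
          rcases List.mem_cons.mp hp' with h' | h'
          · subst h'; simp; omega
          · simp at h'
        · intro p hp'
          rcases List.mem_cons.mp hp' with h' | h'
          · subst h'; rfl
          · simp at h'

theorem loop_expand (k : Nat) (R : List (Int × Int)) (h : RInv R) :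
    expand (eatLoopR k R) = loopS k (expand R) ∧ RInv (eatLoopR k R) := by
  induction k generalizing R with
  | zero => exact ⟨rfl, h⟩
  | succ k ih =>
    obtain ⟨he, hi⟩ := step_expand R h
    obtain ⟨ihe, ihi⟩ := ih (stepR R) hi
    exact ⟨by rw [eatLoopR, ihe, he]; rfl, ihi⟩

theorem head_expand (R : List (Int × Int)) (h : RInv R) :
    ((R.head?).map Prod.fst).getD 0 = ((expand R).head?).getD 0 := by
  match R with
  | [] => rfl
  | (v, c) :: t =>
    have hc1 : 1 ≤ c := h.2 _ List.mem_cons_self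
    obtain ⟨k, hk⟩ : ∃ k, c.toNat = k + 1 := ⟨c.toNat - 1, by omega⟩
    show v = ((List.replicate c.toNat v ++ expand t).head?).getD 0
    rw [hk]
    simp [List.replicate_succ]

-- ===== VERDICT (by name: the statement is the Claim_ definition above) =====
theorem eat_spec : Claim_equal_eat := by
  intro F m _ _
  unfold Spec_eat eat eat_alt
  have hs : (PySem.List.sorted F (fun y => y) false).Pairwise (· ≤ ·) :=
    PySem.List.sorted_pairwise F (fun y => y)
  obtain ⟨he, hi⟩ := rleOf_spec _ hs
  obtain ⟨hle, hli⟩ := loop_expand m.toNat _ hi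
  rw [loopsA_eq m.toNat _ hs, head_expand _ hli, hle, he]
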